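-- pv_equiv track=rewrite | github.com/bjkemp/context-engineering-intro | adventure-agent/mcp_server/adventure_storyteller_mcp/tools/adventure_format_validator.py | _parse_adv_sections
-- ===== SOURCE A (Python) =====
-- from typing import Dict, List, Any
--
-- def _parse_adv_sections(content: str) -> Dict[str, str]:
--     """Parse .adv file into sections."""
--
--     sections = {}
--     current_section = None
--     current_content = []
--
--     for line in content.split('\n'):
--         line = line.strip()
--
--         # Check for section headers
--         if line.startswith('[') and line.endswith(']'):
--             # Save previous section
--             if current_section:
--                 sections[current_section] = '\n'.join(current_content)
--
--             # Start new section
--             current_section = line[1:-1]  # Remove brackets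
--             current_content = []
--         else:
--             if current_section:
--                 current_content.append(line)
--
--     # Save last section
--     if current_section:
--         sections[current_section] = '\n'.join(current_content)
--
--     return sections
-- ===== SOURCE B (Python) =====
-- def _parse_adv_sections(content: str):
--     """Parse .adv file into sections (block-slicing re-implementation)."""
--     lines = [line.strip() for line in content.split('\n')]
--     n = len(lines)
--     sections = {}
--     i = 0
--     while i < n:
--         line = lines[i]
--         if line.startswith('[') and line.endswith(']'):
--             name = line[1:-1]
--             j = i + 1
--             while j < n and not (lines[j].startswith('[') and lines[j].endswith(']')):
--                 j += 1
--             if name: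
--                 sections[name] = '\n'.join(lines[i + 1:j])
--             i = j
--         else:
--             i += 1
--     return sections
-- ===== Notes on version B (the rewrite author's own statement) =====
-- stated objective: alternative
-- what changed: Replaces A's stateful accumulator pass (current_section/current_content carried across lines with deferred saves) by strip-all-lines first, then block slicing: each header found scans forward to the next header and assigns the joined slice between them directly.
import Mathlib
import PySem

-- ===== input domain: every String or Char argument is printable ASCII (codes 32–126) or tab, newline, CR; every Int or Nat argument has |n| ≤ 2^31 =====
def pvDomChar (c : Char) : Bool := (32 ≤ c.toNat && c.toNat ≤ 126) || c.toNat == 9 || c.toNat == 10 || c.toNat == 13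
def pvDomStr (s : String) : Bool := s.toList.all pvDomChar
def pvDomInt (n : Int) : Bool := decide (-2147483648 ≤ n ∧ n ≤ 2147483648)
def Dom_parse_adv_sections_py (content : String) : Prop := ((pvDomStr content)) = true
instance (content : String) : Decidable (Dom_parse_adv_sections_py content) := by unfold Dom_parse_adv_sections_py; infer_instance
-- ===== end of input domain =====

-- B replaces A's stateful single pass (carrying current_section/current_content) by strip-all-lines
-- first, then block slicing between consecutive header lines; same result, same O(n) cost.

-- ===== PORT A =====
-- loop body of A's 'for line in content.split('\n')'
def pvAStep (st : PySem.Dict String String × Option String × List String) (line : String) :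
    PySem.Dict String String × Option String × List String :=
  let line := PySem.Str.strip line
  if PySem.Str.startswith line "[" && PySem.Str.endswith line "]" then
    let sections :=
      match st.2.1 with
      | some s => if s ≠ "" then st.1.insert s (PySem.Str.join "\n" st.2.2) else st.1
      | none => st.1
    (sections, some (PySem.Str.slice line (some 1) (some (-1))), ([] : List String))
  else
    match st.2.1 with
    | some s => if s ≠ "" then (st.1, st.2.1, st.2.2 ++ [line]) else st
    | none => st

def parse_adv_sections_py (content : String) : List (String × String) :=
  let st := ((PySem.Str.split? content "\n").getD []).foldl pvAStep
      ((PySem.Dict.empty : PySem.Dict String String), (none : Option String), ([] : List String))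
  (match st.2.1 with
   | some s => if s ≠ "" then st.1.insert s (PySem.Str.join "\n" st.2.2) else st.1
   | none => st.1).items

-- ===== PORT B =====
def pvBIsHeader (line : String) : Bool :=
  PySem.Str.startswith line "[" && PySem.Str.endswith line "]"

-- B's inner 'while j < n and not header: j += 1'
def pvBScanEnd (lines : List String) (j : Nat) : Nat :=
  if h : j < lines.length then
    if pvBIsHeader lines[j] then j else pvBScanEnd lines (j + 1)
  else j
termination_by lines.length - j

theorem pvBScanEnd_ge (lines : List String) (j : Nat) : j ≤ pvBScanEnd lines j := by
  fun_induction pvBScanEnd lines j with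
  | case1 => omega
  | case2 _ _ _ ih => omega
  | case3 => omega

-- B's outer 'while i < n' loop
def pvBLoop (lines : List String) (sections : PySem.Dict String String) (i : Nat) :
    PySem.Dict String String :=
  if h : i < lines.length then
    let line := lines[i]
    if pvBIsHeader line then
      let name := PySem.Str.slice line (some 1) (some (-1))
      let j := pvBScanEnd lines (i + 1)
      let sections :=
        if name ≠ "" then
          sections.insert name
            (PySem.Str.join "\n" (PySem.List.slice lines (some ((i : Int) + 1)) (some (j : Int))))
        else sections
      pvBLoop lines sections j
    else pvBLoop lines sections (i + 1)
  else sections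
termination_by lines.length - i
decreasing_by
  · have := pvBScanEnd_ge lines (i + 1); omega
  · omega

def parse_adv_sections_py_alt (content : String) : List (String × String) :=
  let lines := ((PySem.Str.split? content "\n").getD []).map PySem.Str.strip
  (pvBLoop lines PySem.Dict.empty 0).items

-- ===== PRECONDITION & SPEC =====
def Spec_parse_adv_sections_py (content : String) (out : List (String × String)) : Prop := out = parse_adv_sections_py_alt content
instance (content : String) (out : List (String × String)) : Decidable (Spec_parse_adv_sections_py content out) := by unfold Spec_parse_adv_sections_py; infer_instance

-- ===== CLAIM (what is proved, stated in full; the proofs are below) =====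
def Claim_equal_parse_adv_sections_py : Prop := ∀ (content : String), Dom_parse_adv_sections_py content → Spec_parse_adv_sections_py content (parse_adv_sections_py content)

-- ===== LEMMAS AND PROOFS =====

-- A's loop body applied to an already-stripped line
def pvAStepC (st : PySem.Dict String String × Option String × List String) (line : String) :
    PySem.Dict String String × Option String × List String :=
  if PySem.Str.startswith line "[" && PySem.Str.endswith line "]" then
    let sections :=
      match st.2.1 with
      | some s => if s ≠ "" then st.1.insert s (PySem.Str.join "\n" st.2.2) else st.1
      | none => st.1
    (sections, some (PySem.Str.slice line (some 1) (some (-1))), ([] : List String))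
  else
    match st.2.1 with
    | some s => if s ≠ "" then (st.1, st.2.1, st.2.2 ++ [line]) else st
    | none => st

-- A's final 'save last section'
def pvFinish (st : PySem.Dict String String × Option String × List String) :
    PySem.Dict String String :=
  match st.2.1 with
  | some s => if s ≠ "" then st.1.insert s (PySem.Str.join "\n" st.2.2) else st.1
  | none => st.1

-- common recursive shape: process pre-stripped lines block by block
def pvGo (d : PySem.Dict String String) (ls : List String) : PySem.Dict String String :=
  match ls with
  | [] => d
  | l :: ls' =>
    if pvBIsHeader l then
      let name := PySem.Str.slice l (some 1) (some (-1))
      let body := ls'.takeWhile (fun x => !pvBIsHeader x)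
      let rest := ls'.dropWhile (fun x => !pvBIsHeader x)
      pvGo (if name ≠ "" then d.insert name (PySem.Str.join "\n" body) else d) rest
    else pvGo d ls'
termination_by ls.length
decreasing_by
  · have := List.length_dropWhile_le (fun x => !pvBIsHeader x) ls'; simpa using Nat.lt_succ_of_le this
  · simp

theorem pvGo_nil (d : PySem.Dict String String) : pvGo d [] = d := by rw [pvGo]

theorem pvGo_cons_hdr (d : PySem.Dict String String) (l : String) (ls' : List String)
    (h : pvBIsHeader l = true) :
    pvGo d (l :: ls') =
      pvGo (if PySem.Str.slice l (some 1) (some (-1)) ≠ "" then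
              d.insert (PySem.Str.slice l (some 1) (some (-1)))
                (PySem.Str.join "\n" (ls'.takeWhile (fun x => !pvBIsHeader x)))
            else d)
        (ls'.dropWhile (fun x => !pvBIsHeader x)) := by
  rw [pvGo]; simp [h]

theorem pvGo_cons_nonhdr (d : PySem.Dict String String) (l : String) (ls' : List String)
    (h : pvBIsHeader l = false) : pvGo d (l :: ls') = pvGo d ls' := by
  rw [pvGo]; simp [h]

theorem pvGo_skip (d : PySem.Dict String String) (body rest : List String)
    (h : ∀ x ∈ body, pvBIsHeader x = false) :
    pvGo d (body ++ rest) = pvGo d rest := by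
  induction body with
  | nil => rfl
  | cons x xs ih =>
    rw [List.cons_append, pvGo_cons_nonhdr d x (xs ++ rest) (h x (by simp))]
    exact ih (fun y hy => h y (by simp [hy]))

theorem pvBScanEnd_eq (lines : List String) (j : Nat) :
    pvBScanEnd lines j = j + ((lines.drop j).takeWhile (fun x => !pvBIsHeader x)).length := by
  fun_induction pvBScanEnd lines j with
  | case1 j h hhdr =>
    rw [List.drop_eq_getElem_cons h, List.takeWhile_cons]
    simp [hhdr]
  | case2 j h hhdr ih =>
    rw [List.drop_eq_getElem_cons h, List.takeWhile_cons, ih]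
    simp only [hhdr, Bool.not_false, if_pos]
    simp
    omega
  | case3 j h =>
    have : lines.drop j = [] := List.drop_eq_nil_of_le (by omega)
    simp [this]

theorem tw_take (p : String → Bool) (xs : List String) :
    xs.take (xs.takeWhile p).length = xs.takeWhile p := by
  have h := List.takeWhile_append_dropWhile (p := p) (l := xs)
  calc xs.take (xs.takeWhile p).length
      = (xs.takeWhile p ++ xs.dropWhile p).take (xs.takeWhile p).length := by rw [h]
    _ = xs.takeWhile p := List.take_left ..

theorem dw_drop (p : String → Bool) (xs : List String) :
    xs.drop (xs.takeWhile p).length = xs.dropWhile p := by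
  have h := List.takeWhile_append_dropWhile (p := p) (l := xs)
  calc xs.drop (xs.takeWhile p).length
      = (xs.takeWhile p ++ xs.dropWhile p).drop (xs.takeWhile p).length := by rw [h]
    _ = xs.dropWhile p := List.drop_left ..

theorem pvBLoop_eq_go (lines : List String) (d : PySem.Dict String String) (i : Nat) :
    pvBLoop lines d i = pvGo d (lines.drop i) := by
  fun_induction pvBLoop lines d i
  case case1 =>
    rename_i d i hlt line hhdr name j sections' ih
    have hcast : ((i : Int) + 1) = ((i + 1 : Nat) : Int) := by push_cast; ring
    have hslice : PySem.List.slice lines (some ((i : Int) + 1))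
        (some ((pvBScanEnd lines (i + 1) : Nat) : Int)) =
        (lines.drop (i + 1)).takeWhile (fun x => !pvBIsHeader x) := by
      rw [pvBScanEnd_eq, hcast, PySem.List.slice_natCast, Nat.add_sub_cancel_left, tw_take]
    have hdrop : lines.drop (pvBScanEnd lines (i + 1)) =
        (lines.drop (i + 1)).dropWhile (fun x => !pvBIsHeader x) := by
      rw [pvBScanEnd_eq, ← List.drop_drop, dw_drop]
    rw [List.drop_eq_getElem_cons hlt, pvGo_cons_hdr _ _ _ hhdr, ih]
    simp only [sections', name, j, line]
    rw [hslice, hdrop]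
    simp only [dite_eq_ite]
  case case2 =>
    rename_i d i hlt line hhdr ih
    rw [List.drop_eq_getElem_cons hlt, ih,
      pvGo_cons_nonhdr _ _ _ (by simpa using hhdr)]
  case case3 =>
    rename_i d i h
    rw [List.drop_eq_nil_of_le (by omega), pvGo_nil]

-- main invariant: A's fold with a falsy current section equals pvGo; with an active section s
-- and pending content c it equals pvGo after saving s with c plus the lines up to the next header
theorem pvMain (ls : List String) :
    (∀ (d : PySem.Dict String String) (c : List String) (cur : Option String),
        (cur = none ∨ cur = some "") →
        pvFinish (ls.foldl pvAStepC (d, cur, c)) = pvGo d ls) ∧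
    (∀ (d : PySem.Dict String String) (s : String) (c : List String), s ≠ "" →
        pvFinish (ls.foldl pvAStepC (d, some s, c)) =
          pvGo (d.insert s (PySem.Str.join "\n" (c ++ ls.takeWhile (fun x => !pvBIsHeader x))))
            (ls.dropWhile (fun x => !pvBIsHeader x))) := by
  induction ls with
  | nil =>
    constructor
    · rintro d c cur (rfl | rfl) <;> simp [pvFinish, pvGo_nil]
    · intro d s c hs
      simp [pvFinish, pvGo_nil, hs]
  | cons l ls' ih =>
    constructor
    · rintro d c cur hcur
      by_cases hhdr : pvBIsHeader l = true
      · have hstep : pvAStepC (d, cur, c) l =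
            (d, some (PySem.Str.slice l (some 1) (some (-1))), ([] : List String)) := by
          have hc : (PySem.Str.startswith l "[" && PySem.Str.endswith l "]") = true := hhdr
          rcases hcur with rfl | rfl <;> (unfold pvAStepC; rw [hc]; simp)
        rw [List.foldl_cons, hstep, pvGo_cons_hdr _ _ _ hhdr]
        by_cases hname : PySem.Str.slice l (some 1) (some (-1)) = ""
        · rw [ih.1 d ([] : List String) _ (Or.inr (by rw [hname])), if_neg (by simp [hname])]
          conv_lhs => rw [← List.takeWhile_append_dropWhile (p := fun x => !pvBIsHeader x) (l := ls')]
          exact (pvGo_skip d _ _ (fun x hx => by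
            have := List.mem_takeWhile_imp (p := fun x => !pvBIsHeader x) (l := ls') hx
            simpa using this))
        · rw [ih.2 d _ ([] : List String) hname, if_pos hname]
          simp
      · have hh : pvBIsHeader l = false := by simpa using hhdr
        have hstep : pvAStepC (d, cur, c) l = (d, cur, c) := by
          have hc : (PySem.Str.startswith l "[" && PySem.Str.endswith l "]") = false := hh
          rcases hcur with rfl | rfl <;> (unfold pvAStepC; rw [hc]; simp)
        rw [List.foldl_cons, hstep, pvGo_cons_nonhdr _ _ _ hh, ih.1 d c cur hcur]
    · intro d s c hs
      by_cases hhdr : pvBIsHeader l = true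
      · have hstep : pvAStepC (d, some s, c) l =
            (d.insert s (PySem.Str.join "\n" c),
             some (PySem.Str.slice l (some 1) (some (-1))), ([] : List String)) := by
          have hc : (PySem.Str.startswith l "[" && PySem.Str.endswith l "]") = true := hhdr
          unfold pvAStepC; rw [hc]; simp [hs]
        rw [List.foldl_cons, hstep]
        have htw : (l :: ls').takeWhile (fun x => !pvBIsHeader x) = [] := by
          simp [hhdr]
        have hdw : (l :: ls').dropWhile (fun x => !pvBIsHeader x) = l :: ls' := by
          simp [hhdr]
        rw [htw, hdw, List.append_nil, pvGo_cons_hdr _ _ _ hhdr]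
        by_cases hname : PySem.Str.slice l (some 1) (some (-1)) = ""
        · rw [ih.1 _ ([] : List String) _ (Or.inr (by rw [hname])), if_neg (by simp [hname])]
          conv_lhs => rw [← List.takeWhile_append_dropWhile (p := fun x => !pvBIsHeader x) (l := ls')]
          exact (pvGo_skip _ _ _ (fun x hx => by
            have := List.mem_takeWhile_imp (p := fun x => !pvBIsHeader x) (l := ls') hx
            simpa using this))
        · rw [ih.2 _ _ ([] : List String) hname, if_pos hname]
          simp
      · have hh : pvBIsHeader l = false := by simpa using hhdr
        have hstep : pvAStepC (d, some s, c) l = (d, some s, c ++ [l]) := by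
          have hc : (PySem.Str.startswith l "[" && PySem.Str.endswith l "]") = false := hh
          unfold pvAStepC; rw [hc]; simp [hs]
        rw [List.foldl_cons, hstep, ih.2 d s (c ++ [l]) hs]
        have htw : (l :: ls').takeWhile (fun x => !pvBIsHeader x) =
            l :: ls'.takeWhile (fun x => !pvBIsHeader x) := by
          simp [hh]
        have hdw : (l :: ls').dropWhile (fun x => !pvBIsHeader x) =
            ls'.dropWhile (fun x => !pvBIsHeader x) := by
          simp [hh]
        rw [htw, hdw]
        congr 3
        simp

-- ===== VERDICT (by name: the statement is the Claim_ definition above) =====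
theorem parse_adv_sections_py_spec : Claim_equal_parse_adv_sections_py := by
  intro content _
  show parse_adv_sections_py content = parse_adv_sections_py_alt content
  have hA : parse_adv_sections_py content =
      (pvFinish (((PySem.Str.split? content "\n").getD []).foldl pvAStep
        ((PySem.Dict.empty : PySem.Dict String String), (none : Option String),
          ([] : List String)))).items := rfl
  have hB : parse_adv_sections_py_alt content =
      (pvBLoop (((PySem.Str.split? content "\n").getD []).map PySem.Str.strip)
        PySem.Dict.empty 0).items := rfl
  rw [hA, hB, pvBLoop_eq_go, List.drop_zero]
  have hfold : ((PySem.Str.split? content "\n").getD []).foldl pvAStep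
      ((PySem.Dict.empty : PySem.Dict String String), (none : Option String),
        ([] : List String)) =
      (((PySem.Str.split? content "\n").getD []).map PySem.Str.strip).foldl pvAStepC
      (PySem.Dict.empty, none, []) := by
    rw [List.foldl_map]
    rfl
  rw [hfold, (pvMain _).1 PySem.Dict.empty [] none (Or.inl rfl)]
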